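-- pv_equiv track=rewrite | github.com/chenmike1986/change_pov | generate_training_data/conll_data/generate_training_data_m6.py | map_raw_sequence_to_sentence
-- ===== SOURCE A (Python) =====
-- def map_raw_sequence_to_sentence(pre_padding_count, sorted_sentence_num_list, sentence_num_to_sentence_text, start_token_index_in_sentence, end_token_index_in_sentence):
--     token_index = pre_padding_count
--     token_index_to_sentence_num = {}
--     token_index_to_index_in_sentence = {}
--     for i in range(len(sorted_sentence_num_list)):
--         sentence_num = sorted_sentence_num_list[i]
--         sentence_text = sentence_num_to_sentence_text[sentence_num]
--         sentence_text_parts = sentence_text.split()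
--         if i == 0 and len(sorted_sentence_num_list) > 1:
--             for j in range(start_token_index_in_sentence, len(sentence_text_parts)):
--                 token_index_to_sentence_num[token_index] = sentence_num
--                 token_index_to_index_in_sentence[token_index] = j
--                 token_index = token_index + 1
--         elif i == len(sorted_sentence_num_list) - 1 and len(sorted_sentence_num_list) > 1:
--             for j in range(end_token_index_in_sentence+1):
--                 token_index_to_sentence_num[token_index] = sentence_num
--                 token_index_to_index_in_sentence[token_index] = j
--                 token_index = token_index + 1
--         elif len(sorted_sentence_num_list) == 1:
--             for j in range(start_token_index_in_sentence, end_token_index_in_sentence+1):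
--                 token_index_to_sentence_num[token_index] = sentence_num
--                 token_index_to_index_in_sentence[token_index] = j
--                 token_index = token_index + 1
--         else:
--             for j in range(len(sentence_text_parts)):
--                 token_index_to_sentence_num[token_index] = sentence_num
--                 token_index_to_index_in_sentence[token_index] = j
--                 token_index = token_index + 1
--
--     return token_index_to_sentence_num, token_index_to_index_in_sentence
-- ===== SOURCE B (Python) =====
-- def map_raw_sequence_to_sentence(pre_padding_count, sorted_sentence_num_list, sentence_num_to_sentence_text, start_token_index_in_sentence, end_token_index_in_sentence):
--     n = len(sorted_sentence_num_list)
--     # Phase 1: one (sentence_num, lo, count) descriptor per sentence; its j-range is [lo, lo+count).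
--     segs = []
--     for i, num in enumerate(sorted_sentence_num_list):
--         m = len(sentence_num_to_sentence_text[num].split())
--         if n == 1:
--             lo, hi = start_token_index_in_sentence, end_token_index_in_sentence + 1
--         elif i == 0:
--             lo, hi = start_token_index_in_sentence, m
--         elif i == n - 1:
--             lo, hi = 0, end_token_index_in_sentence + 1
--         else:
--             lo, hi = 0, m
--         segs.append((num, lo, max(hi - lo, 0)))
--     # Phase 2: global base of each segment by prefix sums; no per-token counter.
--     bases = [pre_padding_count]
--     for _, _, c in segs:
--         bases.append(bases[-1] + c)
--     # Phase 3: each dict independently, keys and positions by arithmetic.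
--     sent = {b + k: num for (num, lo, cnt), b in zip(segs, bases) for k in range(cnt)}
--     pos = {b + k: lo + k for (num, lo, cnt), b in zip(segs, bases) for k in range(cnt)}
--     return sent, pos
-- ===== Notes on version B (the rewrite author's own statement) =====
-- stated objective: alternative
-- what changed: Replaces A's per-token running counter threaded through four separate dict-emission loops by a three-phase pipeline: per-sentence (num, lo, count) descriptors, a prefix-sum list of segment base indices, and two independent dict comprehensions whose keys (base+k) and positions (lo+k) are computed arithmetically instead of by incrementing shared loop state.
import Mathlib
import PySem

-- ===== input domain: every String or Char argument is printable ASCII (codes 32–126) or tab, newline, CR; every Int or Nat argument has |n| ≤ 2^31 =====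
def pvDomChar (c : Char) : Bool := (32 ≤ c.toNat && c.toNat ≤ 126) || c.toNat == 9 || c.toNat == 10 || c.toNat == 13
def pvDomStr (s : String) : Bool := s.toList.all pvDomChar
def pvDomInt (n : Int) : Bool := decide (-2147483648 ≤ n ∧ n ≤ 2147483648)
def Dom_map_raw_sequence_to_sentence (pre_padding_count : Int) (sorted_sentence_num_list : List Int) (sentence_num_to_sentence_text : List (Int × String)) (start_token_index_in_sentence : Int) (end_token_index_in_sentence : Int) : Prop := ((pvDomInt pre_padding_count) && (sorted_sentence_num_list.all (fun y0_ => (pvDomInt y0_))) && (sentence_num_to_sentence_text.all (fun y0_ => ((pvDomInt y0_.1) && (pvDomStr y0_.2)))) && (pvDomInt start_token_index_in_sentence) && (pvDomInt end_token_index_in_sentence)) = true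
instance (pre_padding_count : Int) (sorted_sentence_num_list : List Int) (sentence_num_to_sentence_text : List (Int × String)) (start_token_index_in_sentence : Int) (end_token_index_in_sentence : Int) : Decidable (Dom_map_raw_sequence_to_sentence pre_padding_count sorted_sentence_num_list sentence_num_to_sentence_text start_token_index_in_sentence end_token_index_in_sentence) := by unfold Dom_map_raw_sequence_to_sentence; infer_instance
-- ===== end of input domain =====

-- B replaces A's per-token running counter threaded through four emission loops by a three-phase
-- pipeline: per-sentence (num, lo, count) descriptors, prefix-sum bases, and two independent
-- dict comprehensions whose keys/positions are computed arithmetically (objective: alternative, same cost).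


-- ===== PORT A =====
def map_raw_sequence_to_sentence (pre_padding_count : Int) (sorted_sentence_num_list : List Int) (sentence_num_to_sentence_text : List (Int × String)) (start_token_index_in_sentence : Int) (end_token_index_in_sentence : Int) : (List (Int × Int)) × (List (Int × Int)) :=
  let n : Int := sorted_sentence_num_list.length
  let st :=
    (PySem.List.enumerate sorted_sentence_num_list 0).foldl
      (fun st x =>
        let sentence_text : String := (List.lookup x.2 sentence_num_to_sentence_text).getD ""
        let parts := PySem.Str.split₀ sentence_text
        let js :=
          if x.1 = 0 ∧ n > 1 then PySem.List.pyRange start_token_index_in_sentence (parts.length : Int) 1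
          else if x.1 = n - 1 ∧ n > 1 then PySem.List.pyRange 0 (end_token_index_in_sentence + 1) 1
          else if n = 1 then PySem.List.pyRange start_token_index_in_sentence (end_token_index_in_sentence + 1) 1
          else PySem.List.pyRange 0 (parts.length : Int) 1
        js.foldl (fun st j => (st.1 + 1, st.2.1.insert st.1 x.2, st.2.2.insert st.1 j)) st)
      (pre_padding_count, (PySem.Dict.empty : PySem.Dict Int Int), (PySem.Dict.empty : PySem.Dict Int Int))
  (st.2.1.items, st.2.2.items)

-- ===== PORT B =====
def map_raw_sequence_to_sentence_alt (pre_padding_count : Int) (sorted_sentence_num_list : List Int) (sentence_num_to_sentence_text : List (Int × String)) (start_token_index_in_sentence : Int) (end_token_index_in_sentence : Int) : (List (Int × Int)) × (List (Int × Int)) :=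
  let n : Int := sorted_sentence_num_list.length
  -- Phase 1: one (sentence_num, lo, count) descriptor per sentence
  let segs :=
    (PySem.List.enumerate sorted_sentence_num_list 0).foldl
      (fun acc x =>
        let m : Int := (PySem.Str.split₀ ((List.lookup x.2 sentence_num_to_sentence_text).getD "")).length
        let lh : Int × Int :=
          if n = 1 then (start_token_index_in_sentence, end_token_index_in_sentence + 1)
          else if x.1 = 0 then (start_token_index_in_sentence, m)
          else if x.1 = n - 1 then (0, end_token_index_in_sentence + 1)
          else (0, m)
        acc ++ [(x.2, lh.1, max (lh.2 - lh.1) 0)])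
      ([] : List (Int × Int × Int))
  -- Phase 2: prefix-sum bases (bases.append(bases[-1] + c))
  let bases := segs.foldl (fun bs q => bs ++ [PySem.List.pyGetD bs (-1) 0 + q.2.2]) [pre_padding_count]
  -- Phase 3: each dict independently, keys and positions by arithmetic
  let sent :=
    (segs.zip bases).foldl
      (fun dct q => (PySem.List.pyRange 0 q.1.2.2 1).foldl (fun dc k => dc.insert (q.2 + k) q.1.1) dct)
      (PySem.Dict.empty : PySem.Dict Int Int)
  let pos :=
    (segs.zip bases).foldl
      (fun dct q => (PySem.List.pyRange 0 q.1.2.2 1).foldl (fun dc k => dc.insert (q.2 + k) (q.1.2.1 + k)) dct)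
      (PySem.Dict.empty : PySem.Dict Int Int)
  (sent.items, pos.items)

-- ===== PRECONDITION & SPEC =====
-- Pre_ excludes exactly the inputs where Python A raises KeyError: a sentence number in
-- sorted_sentence_num_list with no entry in sentence_num_to_sentence_text.
def Pre_map_raw_sequence_to_sentence (pre_padding_count : Int) (sorted_sentence_num_list : List Int) (sentence_num_to_sentence_text : List (Int × String)) (start_token_index_in_sentence : Int) (end_token_index_in_sentence : Int) : Prop :=
  ∀ s ∈ sorted_sentence_num_list, s ∈ sentence_num_to_sentence_text.map Prod.fst
instance (pre_padding_count : Int) (sorted_sentence_num_list : List Int) (sentence_num_to_sentence_text : List (Int × String)) (start_token_index_in_sentence : Int) (end_token_index_in_sentence : Int) : Decidable (Pre_map_raw_sequence_to_sentence pre_padding_count sorted_sentence_num_list sentence_num_to_sentence_text start_token_index_in_sentence end_token_index_in_sentence) := by unfold Pre_map_raw_sequence_to_sentence; infer_instance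
def pvWitness_map_raw_sequence_to_sentence : Int × List Int × (List (Int × String)) × Int × Int := (0, [1, 2], [(1, "a b c"), (2, "d e")], 1, 0)
def Spec_map_raw_sequence_to_sentence (pre_padding_count : Int) (sorted_sentence_num_list : List Int) (sentence_num_to_sentence_text : List (Int × String)) (start_token_index_in_sentence : Int) (end_token_index_in_sentence : Int) (out : (List (Int × Int)) × (List (Int × Int))) : Prop := out = map_raw_sequence_to_sentence_alt pre_padding_count sorted_sentence_num_list sentence_num_to_sentence_text start_token_index_in_sentence end_token_index_in_sentence
instance (pre_padding_count : Int) (sorted_sentence_num_list : List Int) (sentence_num_to_sentence_text : List (Int × String)) (start_token_index_in_sentence : Int) (end_token_index_in_sentence : Int) (out : (List (Int × Int)) × (List (Int × Int))) : Decidable (Spec_map_raw_sequence_to_sentence pre_padding_count sorted_sentence_num_list sentence_num_to_sentence_text start_token_index_in_sentence end_token_index_in_sentence out) := by unfold Spec_map_raw_sequence_to_sentence; infer_instance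

-- ===== CLAIM (what is proved, stated in full; the proofs are below) =====
def Claim_equal_map_raw_sequence_to_sentence : Prop := ∀ (pre_padding_count : Int) (sorted_sentence_num_list : List Int) (sentence_num_to_sentence_text : List (Int × String)) (start_token_index_in_sentence : Int) (end_token_index_in_sentence : Int), Dom_map_raw_sequence_to_sentence pre_padding_count sorted_sentence_num_list sentence_num_to_sentence_text start_token_index_in_sentence end_token_index_in_sentence → Pre_map_raw_sequence_to_sentence pre_padding_count sorted_sentence_num_list sentence_num_to_sentence_text start_token_index_in_sentence end_token_index_in_sentence → Spec_map_raw_sequence_to_sentence pre_padding_count sorted_sentence_num_list sentence_num_to_sentence_text start_token_index_in_sentence end_token_index_in_sentence (map_raw_sequence_to_sentence pre_padding_count sorted_sentence_num_list sentence_num_to_sentence_text start_token_index_in_sentence end_token_index_in_sentence)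

-- ===== LEMMAS AND PROOFS =====

-- the word count len(text[num].split()) shared by both branch computations
def pvM (d : List (Int × String)) (num : Int) : Int :=
  ((PySem.Str.split₀ ((List.lookup num d).getD "")).length : Int)

-- A's branch order (lo, hi) and B's branch order (lo, hi)
def pvAB (n s e m i : Int) : Int × Int :=
  if i = 0 ∧ n > 1 then (s, m) else if i = n - 1 ∧ n > 1 then (0, e + 1)
  else if n = 1 then (s, e + 1) else (0, m)
def pvBB (n s e m i : Int) : Int × Int :=
  if n = 1 then (s, e + 1) else if i = 0 then (s, m)
  else if i = n - 1 then (0, e + 1) else (0, m)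

theorem pvBB_eq_pvAB (n s e m i : Int) (hn : 1 ≤ n) : pvBB n s e m i = pvAB n s e m i := by
  unfold pvBB pvAB; split_ifs <;> first | rfl | (exfalso; omega)

-- A's j-range per enumerated element, and B's descriptor per enumerated element
def pvGA (d : List (Int × String)) (n s e : Int) (x : Int × Int) : List Int :=
  PySem.List.pyRange (pvAB n s e (pvM d x.2) x.1).1 (pvAB n s e (pvM d x.2) x.1).2 1
def pvSegF (d : List (Int × String)) (n s e : Int) (x : Int × Int) : Int × Int × Int :=
  (x.2, (pvBB n s e (pvM d x.2) x.1).1,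
   max ((pvBB n s e (pvM d x.2) x.1).2 - (pvBB n s e (pvM d x.2) x.1).1) 0)

-- prefix-sum scan of the counts, and the flat (key, value) pair lists of the two dicts
def pvScan (b : Int) : List (Int × Int × Int) → List Int
  | [] => []
  | q :: t => (b + q.2.2) :: pvScan (b + q.2.2) t

def pvFlatS : List (Int × Int × Int) → Int → List (Int × Int)
  | [], _ => []
  | q :: t, b => (PySem.List.pyRange 0 q.2.2 1).map (fun k => (b + k, q.1)) ++ pvFlatS t (b + q.2.2)
def pvFlatP : List (Int × Int × Int) → Int → List (Int × Int)
  | [], _ => []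
  | q :: t, b => (PySem.List.pyRange 0 q.2.2 1).map (fun k => (b + k, q.2.1 + k)) ++ pvFlatP t (b + q.2.2)

-- ---- A-side characterization (counter fold = enumerate of the flat pair list) ----

theorem pv_foldl_foldl {α β γ : Type} (l : List α) (g : α → List β) (emit : γ → β → γ) (st : γ) :
    l.foldl (fun st x => (g x).foldl emit st) st = (l.flatMap g).foldl emit st := by
  induction l generalizing st with
  | nil => rfl
  | cons a t ih => simp [List.flatMap_cons, List.foldl_append, ih]

theorem pv_counter_fold (P : List (Int × Int)) (p : Int) (d1 d2 : PySem.Dict Int Int) :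
    P.foldl (fun st q => (st.1 + 1, st.2.1.insert st.1 q.1, st.2.2.insert st.1 q.2)) (p, d1, d2)
      = (p + P.length,
         (PySem.List.enumerate P p).foldl (fun dd q => (dd.1.insert q.1 q.2.1, dd.2.insert q.1 q.2.2)) (d1, d2)) := by
  induction P generalizing p d1 d2 with
  | nil => simp [PySem.List.enumerate_nil]
  | cons a t ih =>
    simp only [List.foldl_cons, PySem.List.enumerate_cons, ih]
    congr 1
    simp only [List.length_cons]
    push_cast; ring

theorem pv_main (L : List (Int × Int)) (g : Int × Int → List Int) (p : Int) (d1 d2 : PySem.Dict Int Int) :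
    L.foldl (fun st x => (g x).foldl (fun st j => (st.1 + 1, st.2.1.insert st.1 x.2, st.2.2.insert st.1 j)) st) (p, d1, d2)
      = ((p + (L.flatMap (fun x => (g x).map (fun j => (x.2, j)))).length : Int),
         (PySem.List.enumerate (L.flatMap (fun x => (g x).map (fun j => (x.2, j)))) p).foldl
           (fun dd q => (dd.1.insert q.1 q.2.1, dd.2.insert q.1 q.2.2)) (d1, d2)) := by
  have h : (fun (st : Int × PySem.Dict Int Int × PySem.Dict Int Int) (x : Int × Int) =>
      (g x).foldl (fun st j => (st.1 + 1, st.2.1.insert st.1 x.2, st.2.2.insert st.1 j)) st)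
      = (fun st x => ((g x).map (fun j => (x.2, j))).foldl
          (fun st q => (st.1 + 1, st.2.1.insert st.1 q.1, st.2.2.insert st.1 q.2)) st) := by
    funext st x
    rw [List.foldl_map]
  rw [h, pv_foldl_foldl, pv_counter_fold]

theorem pvItems_enum1 (P : List (Int × Int)) (p : Int) :
    ((PySem.List.enumerate P p).foldl (fun d q => d.insert q.1 q.2.1) (PySem.Dict.empty : PySem.Dict Int Int)).items
      = (PySem.List.enumerate P p).map (fun q => (q.1, q.2.1)) := by
  have h := PySem.Dict.items_foldl_insert_fresh (PySem.List.enumerate P p) Prod.fst (fun q => q.2.1)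
    (PySem.Dict.empty : PySem.Dict Int Int)
    (by intro a _; rfl)
    (by have := PySem.List.map_fst_enumerate P p
        simpa [this] using PySem.List.nodup_pyRange_one p (p + P.length))
  simpa using h

theorem pvItems_enum2 (P : List (Int × Int)) (p : Int) :
    ((PySem.List.enumerate P p).foldl (fun d q => d.insert q.1 q.2.2) (PySem.Dict.empty : PySem.Dict Int Int)).items
      = (PySem.List.enumerate P p).map (fun q => (q.1, q.2.2)) := by
  have h := PySem.Dict.items_foldl_insert_fresh (PySem.List.enumerate P p) Prod.fst (fun q => q.2.2)
    (PySem.Dict.empty : PySem.Dict Int Int)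
    (by intro a _; rfl)
    (by have := PySem.List.map_fst_enumerate P p
        simpa [this] using PySem.List.nodup_pyRange_one p (p + P.length))
  simpa using h

theorem pvA_eq (p : Int) (L : List Int) (d : List (Int × String)) (s e : Int) :
    map_raw_sequence_to_sentence p L d s e =
      ((PySem.List.enumerate ((PySem.List.enumerate L 0).flatMap
          (fun x => (pvGA d (L.length : Int) s e x).map (fun j => (x.2, j)))) p).map (fun q => (q.1, q.2.1)),
       (PySem.List.enumerate ((PySem.List.enumerate L 0).flatMap
          (fun x => (pvGA d (L.length : Int) s e x).map (fun j => (x.2, j)))) p).map (fun q => (q.1, q.2.2))) := by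
  unfold map_raw_sequence_to_sentence
  have hb : (fun (st : Int × PySem.Dict Int Int × PySem.Dict Int Int) (x : Int × Int) =>
      (if x.1 = 0 ∧ (L.length : Int) > 1 then
          PySem.List.pyRange s ((PySem.Str.split₀ ((List.lookup x.2 d).getD "")).length : Int) 1
        else if x.1 = (L.length : Int) - 1 ∧ (L.length : Int) > 1 then PySem.List.pyRange 0 (e + 1) 1
        else if (L.length : Int) = 1 then PySem.List.pyRange s (e + 1) 1
        else PySem.List.pyRange 0 ((PySem.Str.split₀ ((List.lookup x.2 d).getD "")).length : Int) 1).foldl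
        (fun st j => (st.1 + 1, st.2.1.insert st.1 x.2, st.2.2.insert st.1 j)) st)
      = (fun st x => (pvGA d (L.length : Int) s e x).foldl
          (fun st j => (st.1 + 1, st.2.1.insert st.1 x.2, st.2.2.insert st.1 j)) st) := by
    funext st x
    unfold pvGA pvAB pvM
    split_ifs <;> rfl
  dsimp only
  rw [hb, pv_main,
    PySem.List.foldl_prod_mk (fun (a : PySem.Dict Int Int) (q : Int × Int × Int) => a.insert q.1 q.2.1)
      (fun (b : PySem.Dict Int Int) (q : Int × Int × Int) => b.insert q.1 q.2.2),
    pvItems_enum1, pvItems_enum2]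

-- ---- B-side characterization ----

theorem pvBases_eq : ∀ (segs : List (Int × Int × Int)) (bs0 : List Int) (h : bs0 ≠ []),
    segs.foldl (fun bs q => bs ++ [PySem.List.pyGetD bs (-1) 0 + q.2.2]) bs0
      = bs0 ++ pvScan (bs0.getLast h) segs := by
  intro segs
  induction segs with
  | nil => intro bs0 h; simp [pvScan]
  | cons q t ih =>
    intro bs0 h
    simp only [List.foldl_cons]
    rw [PySem.List.pyGetD_neg_one bs0 0 h, ih (bs0 ++ [bs0.getLast h + q.2.2]) (by simp)]
    rw [List.getLast_concat]
    simp [pvScan]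

theorem pvB_foldS : ∀ (segs : List (Int × Int × Int)) (b : Int) (dct : PySem.Dict Int Int),
    (∀ q ∈ segs, 0 ≤ q.2.2) → (∀ k ∈ dct.keys, k < b) → dct.keys.Nodup →
    ((segs.zip (b :: pvScan b segs)).foldl
       (fun dct q => (PySem.List.pyRange 0 q.1.2.2 1).foldl (fun dc k => dc.insert (q.2 + k) q.1.1) dct) dct).items
      = dct.items ++ pvFlatS segs b := by
  intro segs
  induction segs with
  | nil => intro b dct _ _ _; simp [pvFlatS]
  | cons q t ih =>
    intro b dct hc hk hnd
    have hinj : Function.Injective (fun k : Int => b + k) := add_right_injective b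
    have hfresh : ∀ a ∈ PySem.List.pyRange 0 q.2.2 1, dct.contains (b + a) = false := by
      intro a ha
      rw [PySem.Dict.contains_eq_decide_mem_keys]
      simp only [decide_eq_false_iff_not]
      intro hmem
      have h1 := hk _ hmem
      have h2 := (PySem.List.mem_pyRange_one.mp ha).1
      omega
    have hndm : ((PySem.List.pyRange 0 q.2.2 1).map (fun k => b + k)).Nodup :=
      (PySem.List.nodup_pyRange_one 0 q.2.2).map hinj
    have hitems : ((PySem.List.pyRange 0 q.2.2 1).foldl (fun dc k => dc.insert (b + k) q.1) dct).items
        = dct.items ++ (PySem.List.pyRange 0 q.2.2 1).map (fun k => (b + k, q.1)) :=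
      PySem.Dict.items_foldl_insert_fresh _ _ _ _ hfresh hndm
    have hkeys : ((PySem.List.pyRange 0 q.2.2 1).foldl (fun dc k => dc.insert (b + k) q.1) dct).keys
        = dct.keys ++ (PySem.List.pyRange 0 q.2.2 1).map (fun k => b + k) := by
      simp only [PySem.Dict.keys, hitems, List.map_append, List.map_map]
      rfl
    have hq : 0 ≤ q.2.2 := hc q (by simp)
    have hk' : ∀ k ∈ ((PySem.List.pyRange 0 q.2.2 1).foldl (fun dc k => dc.insert (b + k) q.1) dct).keys,
        k < b + q.2.2 := by
      rw [hkeys]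
      intro k hkm
      rcases List.mem_append.mp hkm with hold | hnew
      · have := hk _ hold; omega
      · rcases List.mem_map.mp hnew with ⟨a, ha, rfl⟩
        have := (PySem.List.mem_pyRange_one.mp ha).2
        omega
    have hnd' : ((PySem.List.pyRange 0 q.2.2 1).foldl (fun dc k => dc.insert (b + k) q.1) dct).keys.Nodup := by
      rw [hkeys]
      refine List.Nodup.append hnd hndm ?_
      intro a hold hnew
      rcases List.mem_map.mp hnew with ⟨a', ha', he⟩
      have h1 := hk _ hold
      have h2 := (PySem.List.mem_pyRange_one.mp ha').1
      omega
    have ht : ∀ r ∈ t, 0 ≤ r.2.2 := fun r hr => hc r (by simp [hr])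
    calc ((( q :: t).zip (b :: pvScan b (q :: t))).foldl
           (fun dct r => (PySem.List.pyRange 0 r.1.2.2 1).foldl (fun dc k => dc.insert (r.2 + k) r.1.1) dct) dct).items
        = ((t.zip ((b + q.2.2) :: pvScan (b + q.2.2) t)).foldl
           (fun dct r => (PySem.List.pyRange 0 r.1.2.2 1).foldl (fun dc k => dc.insert (r.2 + k) r.1.1) dct)
           ((PySem.List.pyRange 0 q.2.2 1).foldl (fun dc k => dc.insert (b + k) q.1) dct)).items := by
          rfl
      _ = ((PySem.List.pyRange 0 q.2.2 1).foldl (fun dc k => dc.insert (b + k) q.1) dct).items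
            ++ pvFlatS t (b + q.2.2) := ih (b + q.2.2) _ ht hk' hnd'
      _ = dct.items ++ pvFlatS (q :: t) b := by
          rw [hitems, pvFlatS, List.append_assoc]

theorem pvB_foldP : ∀ (segs : List (Int × Int × Int)) (b : Int) (dct : PySem.Dict Int Int),
    (∀ q ∈ segs, 0 ≤ q.2.2) → (∀ k ∈ dct.keys, k < b) → dct.keys.Nodup →
    ((segs.zip (b :: pvScan b segs)).foldl
       (fun dct q => (PySem.List.pyRange 0 q.1.2.2 1).foldl (fun dc k => dc.insert (q.2 + k) (q.1.2.1 + k)) dct) dct).items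
      = dct.items ++ pvFlatP segs b := by
  intro segs
  induction segs with
  | nil => intro b dct _ _ _; simp [pvFlatP]
  | cons q t ih =>
    intro b dct hc hk hnd
    have hinj : Function.Injective (fun k : Int => b + k) := add_right_injective b
    have hfresh : ∀ a ∈ PySem.List.pyRange 0 q.2.2 1, dct.contains (b + a) = false := by
      intro a ha
      rw [PySem.Dict.contains_eq_decide_mem_keys]
      simp only [decide_eq_false_iff_not]
      intro hmem
      have h1 := hk _ hmem
      have h2 := (PySem.List.mem_pyRange_one.mp ha).1
      omega
    have hndm : ((PySem.List.pyRange 0 q.2.2 1).map (fun k => b + k)).Nodup :=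
      (PySem.List.nodup_pyRange_one 0 q.2.2).map hinj
    have hitems : ((PySem.List.pyRange 0 q.2.2 1).foldl (fun dc k => dc.insert (b + k) (q.2.1 + k)) dct).items
        = dct.items ++ (PySem.List.pyRange 0 q.2.2 1).map (fun k => (b + k, q.2.1 + k)) :=
      PySem.Dict.items_foldl_insert_fresh _ _ _ _ hfresh hndm
    have hkeys : ((PySem.List.pyRange 0 q.2.2 1).foldl (fun dc k => dc.insert (b + k) (q.2.1 + k)) dct).keys
        = dct.keys ++ (PySem.List.pyRange 0 q.2.2 1).map (fun k => b + k) := by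
      simp only [PySem.Dict.keys, hitems, List.map_append, List.map_map]
      rfl
    have hq : 0 ≤ q.2.2 := hc q (by simp)
    have hk' : ∀ k ∈ ((PySem.List.pyRange 0 q.2.2 1).foldl (fun dc k => dc.insert (b + k) (q.2.1 + k)) dct).keys,
        k < b + q.2.2 := by
      rw [hkeys]
      intro k hkm
      rcases List.mem_append.mp hkm with hold | hnew
      · have := hk _ hold; omega
      · rcases List.mem_map.mp hnew with ⟨a, ha, rfl⟩
        have := (PySem.List.mem_pyRange_one.mp ha).2
        omega
    have hnd' : ((PySem.List.pyRange 0 q.2.2 1).foldl (fun dc k => dc.insert (b + k) (q.2.1 + k)) dct).keys.Nodup := by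
      rw [hkeys]
      refine List.Nodup.append hnd hndm ?_
      intro a hold hnew
      rcases List.mem_map.mp hnew with ⟨a', ha', he⟩
      have h1 := hk _ hold
      have h2 := (PySem.List.mem_pyRange_one.mp ha').1
      omega
    have ht : ∀ r ∈ t, 0 ≤ r.2.2 := fun r hr => hc r (by simp [hr])
    calc ((( q :: t).zip (b :: pvScan b (q :: t))).foldl
           (fun dct r => (PySem.List.pyRange 0 r.1.2.2 1).foldl (fun dc k => dc.insert (r.2 + k) (r.1.2.1 + k)) dct) dct).items
        = ((t.zip ((b + q.2.2) :: pvScan (b + q.2.2) t)).foldl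
           (fun dct r => (PySem.List.pyRange 0 r.1.2.2 1).foldl (fun dc k => dc.insert (r.2 + k) (r.1.2.1 + k)) dct)
           ((PySem.List.pyRange 0 q.2.2 1).foldl (fun dc k => dc.insert (b + k) (q.2.1 + k)) dct)).items := by
          rfl
      _ = ((PySem.List.pyRange 0 q.2.2 1).foldl (fun dc k => dc.insert (b + k) (q.2.1 + k)) dct).items
            ++ pvFlatP t (b + q.2.2) := ih (b + q.2.2) _ ht hk' hnd'
      _ = dct.items ++ pvFlatP (q :: t) b := by
          rw [hitems, pvFlatP, List.append_assoc]

theorem pvB_eq (p : Int) (L : List Int) (d : List (Int × String)) (s e : Int) :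
    map_raw_sequence_to_sentence_alt p L d s e =
      (pvFlatS ((PySem.List.enumerate L 0).map (pvSegF d (L.length : Int) s e)) p,
       pvFlatP ((PySem.List.enumerate L 0).map (pvSegF d (L.length : Int) s e)) p) := by
  unfold map_raw_sequence_to_sentence_alt
  have hb : (fun (acc : List (Int × Int × Int)) (x : Int × Int) =>
      acc ++ [(x.2,
        (if (L.length : Int) = 1 then (s, e + 1)
         else if x.1 = 0 then (s, ((PySem.Str.split₀ ((List.lookup x.2 d).getD "")).length : Int))
         else if x.1 = (L.length : Int) - 1 then (0, e + 1)
         else (0, ((PySem.Str.split₀ ((List.lookup x.2 d).getD "")).length : Int))).1,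
        max ((if (L.length : Int) = 1 then (s, e + 1)
         else if x.1 = 0 then (s, ((PySem.Str.split₀ ((List.lookup x.2 d).getD "")).length : Int))
         else if x.1 = (L.length : Int) - 1 then (0, e + 1)
         else (0, ((PySem.Str.split₀ ((List.lookup x.2 d).getD "")).length : Int))).2 -
          (if (L.length : Int) = 1 then (s, e + 1)
           else if x.1 = 0 then (s, ((PySem.Str.split₀ ((List.lookup x.2 d).getD "")).length : Int))
           else if x.1 = (L.length : Int) - 1 then (0, e + 1)
           else (0, ((PySem.Str.split₀ ((List.lookup x.2 d).getD "")).length : Int))).1) 0)])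
      = (fun acc x => acc ++ [pvSegF d (L.length : Int) s e x]) := by
    funext acc x
    unfold pvSegF pvBB pvM
    rfl
  dsimp only
  rw [hb, PySem.List.foldl_append_singleton_eq_map, List.nil_append]
  have hsegs0 : ∀ q ∈ (PySem.List.enumerate L 0).map (pvSegF d (L.length : Int) s e), 0 ≤ q.2.2 := by
    intro q hq
    rcases List.mem_map.mp hq with ⟨x, _, rfl⟩
    exact le_max_right _ _
  rw [pvBases_eq _ [p] (by simp), List.getLast_singleton, List.singleton_append]
  rw [pvB_foldS _ p PySem.Dict.empty hsegs0 (by intro k hk; simp [PySem.Dict.keys_empty] at hk) (by simp [PySem.Dict.keys_empty]),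
      pvB_foldP _ p PySem.Dict.empty hsegs0 (by intro k hk; simp [PySem.Dict.keys_empty] at hk) (by simp [PySem.Dict.keys_empty])]
  rfl

-- ---- the bridge: A's flat pair list enumerated = B's arithmetic pair lists ----

theorem pvBridgeS (d : List (Int × String)) (n s e : Int) (hn : 1 ≤ n) :
    ∀ (X : List (Int × Int)) (p : Int),
    (PySem.List.enumerate (X.flatMap (fun x => (pvGA d n s e x).map (fun j => (x.2, j)))) p).map
        (fun q => (q.1, q.2.1))
      = pvFlatS (X.map (pvSegF d n s e)) p := by
  intro X
  induction X with
  | nil => intro p; rfl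
  | cons x t ih =>
    intro p
    rw [List.flatMap_cons, PySem.List.enumerate_append, List.map_append, List.map_cons, pvFlatS]
    have hab : pvBB n s e (pvM d x.2) x.1 = pvAB n s e (pvM d x.2) x.1 := pvBB_eq_pvAB _ _ _ _ _ hn
    have hlen : (((pvGA d n s e x).map (fun j => (x.2, j))).length : Int) = (pvSegF d n s e x).2.2 := by
      simp only [List.length_map, pvGA, PySem.List.length_pyRange_one, pvSegF, hab]
      omega
    congr 1
    · apply List.ext_getElem
      · simp only [List.length_map, PySem.List.length_enumerate, pvGA,
          PySem.List.length_pyRange_one, pvSegF, hab]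
        omega
      · intro k h1 h2
        simp only [List.getElem_map, PySem.List.getElem_enumerate, PySem.List.getElem_pyRange_one]
        simp [pvSegF]
    · rw [hlen, ih]

theorem pvBridgeP (d : List (Int × String)) (n s e : Int) (hn : 1 ≤ n) :
    ∀ (X : List (Int × Int)) (p : Int),
    (PySem.List.enumerate (X.flatMap (fun x => (pvGA d n s e x).map (fun j => (x.2, j)))) p).map
        (fun q => (q.1, q.2.2))
      = pvFlatP (X.map (pvSegF d n s e)) p := by
  intro X
  induction X with
  | nil => intro p; rfl
  | cons x t ih =>
    intro p
    rw [List.flatMap_cons, PySem.List.enumerate_append, List.map_append, List.map_cons, pvFlatP]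
    have hab : pvBB n s e (pvM d x.2) x.1 = pvAB n s e (pvM d x.2) x.1 := pvBB_eq_pvAB _ _ _ _ _ hn
    have hlen : (((pvGA d n s e x).map (fun j => (x.2, j))).length : Int) = (pvSegF d n s e x).2.2 := by
      simp only [List.length_map, pvGA, PySem.List.length_pyRange_one, pvSegF, hab]
      omega
    congr 1
    · apply List.ext_getElem
      · simp only [List.length_map, PySem.List.length_enumerate, pvGA,
          PySem.List.length_pyRange_one, pvSegF, hab]
        omega
      · intro k h1 h2
        simp only [List.getElem_map, PySem.List.getElem_enumerate, pvGA, PySem.List.getElem_pyRange_one]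
        simp [pvSegF, hab]
    · rw [hlen, ih]

-- ===== VERDICT (by name: the statement is the Claim_ definition above) =====
theorem map_raw_sequence_to_sentence_spec : Claim_equal_map_raw_sequence_to_sentence := by
  intro p L d s e _ _
  unfold Spec_map_raw_sequence_to_sentence
  by_cases hL : L = []
  · subst hL; rfl
  · have hn : 1 ≤ (L.length : Int) := by
      have : 0 < L.length := List.length_pos_iff.mpr hL
      omega
    rw [pvA_eq, pvB_eq, pvBridgeS d (L.length : Int) s e hn (PySem.List.enumerate L 0) p,
        pvBridgeP d (L.length : Int) s e hn (PySem.List.enumerate L 0) p]
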